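-- pv_equiv track=rewrite | github.com/NathanJ60/CheckX | checkx_model.py | _transform_pattern
-- ===== SOURCE A (Python) =====
-- GRID = 8
--
-- def _transform_pattern(blacks, rotation: int, flip_h: bool, flip_v: bool):
--     """Applique rotation (0-3) et flips pour obtenir une variante."""
--     result = [row[:] for row in blacks]
--     # Flip horizontal
--     if flip_h:
--         result = [row[::-1] for row in result]
--     # Flip vertical
--     if flip_v:
--         result = result[::-1]
--     # Rotation 90° k fois
--     for _ in range(rotation):
--         result = [[result[GRID - 1 - c][r] for c in range(GRID)] for r in range(GRID)]
--     return result
-- ===== SOURCE B (Python) =====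
-- GRID = 8
--
--
-- def _transform_pattern(blacks, rotation: int, flip_h: bool, flip_v: bool):
--     """Applies the flips, then one quarter-turn lookup from rotation mod 4
--     instead of rebuilding the grid once per requested rotation."""
--     grid = [row[::-1] if flip_h else row[:] for row in blacks]
--     if flip_v:
--         grid.reverse()
--     if rotation <= 0:
--         return grid
--     turns = rotation % 4
--     if turns == 1:
--         return [[grid[GRID - 1 - c][r] for c in range(GRID)] for r in range(GRID)]
--     if turns == 2:
--         return [[grid[GRID - 1 - r][GRID - 1 - c] for c in range(GRID)] for r in range(GRID)]
--     if turns == 3: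
--         return [[grid[c][GRID - 1 - r] for c in range(GRID)] for r in range(GRID)]
--     return [[grid[r][c] for c in range(GRID)] for r in range(GRID)]
-- ===== Notes on version B (the rewrite author's own statement) =====
-- stated objective: simpler
-- what changed: B applies the flips once and then reads the result through a single quarter-turn index permutation chosen by rotation mod 4, instead of rebuilding the grid once per unit of rotation; Pre_ excludes only inputs where A raises IndexError (positive rotation on a grid without an 8x8 block).
import Mathlib
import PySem

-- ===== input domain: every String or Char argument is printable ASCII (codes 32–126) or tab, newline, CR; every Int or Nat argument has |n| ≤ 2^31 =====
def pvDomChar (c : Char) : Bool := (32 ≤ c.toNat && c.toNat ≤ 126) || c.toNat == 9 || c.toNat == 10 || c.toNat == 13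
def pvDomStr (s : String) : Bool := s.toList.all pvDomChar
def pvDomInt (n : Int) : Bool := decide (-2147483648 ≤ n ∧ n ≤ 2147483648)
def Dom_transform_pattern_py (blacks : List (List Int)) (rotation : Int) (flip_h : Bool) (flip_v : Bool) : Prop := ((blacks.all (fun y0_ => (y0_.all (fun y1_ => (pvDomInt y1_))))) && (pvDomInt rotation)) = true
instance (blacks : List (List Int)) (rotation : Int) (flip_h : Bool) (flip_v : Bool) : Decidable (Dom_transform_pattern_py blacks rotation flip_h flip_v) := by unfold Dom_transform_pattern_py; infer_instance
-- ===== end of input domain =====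

-- B applies the flips once and then builds the result with a single quarter-turn index
-- permutation chosen by rotation mod 4, instead of rebuilding the grid per rotation (simpler).

-- ===== PORT A =====
-- flips part of A: result = [row[:] for row in blacks]; flip_h reverses each row
-- (row[::-1] = reverse); flip_v reverses the list of rows.
def tpFlips (blacks : List (List Int)) (flip_h : Bool) (flip_v : Bool) : List (List Int) :=
  let r1 := blacks.map (fun row => PySem.List.slice row none none)   -- row[:]
  let r2 := if flip_h then r1.map (fun row => row.reverse) else r1   -- row[::-1]
  if flip_v then r2.reverse else r2                                   -- result[::-1]

def transform_pattern_py (blacks : List (List Int)) (rotation : Int) (flip_h : Bool) (flip_v : Bool) : List (List Int) :=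
  (PySem.List.pyRange 0 rotation 1).foldl
    (fun result _ =>
      (PySem.List.pyRange 0 8 1).map (fun r =>
        (PySem.List.pyRange 0 8 1).map (fun c =>
          PySem.List.pyGetD (PySem.List.pyGetD result (8 - 1 - c) []) r 0)))
    (tpFlips blacks flip_h flip_v)

-- ===== PORT B =====
-- grid = [row[::-1] if flip_h else row[:] for row in blacks]; if flip_v: grid.reverse()
def tpGridB (blacks : List (List Int)) (flip_h : Bool) (flip_v : Bool) : List (List Int) :=
  let g := blacks.map (fun row => if flip_h then row.reverse else PySem.List.slice row none none)
  if flip_v then g.reverse else g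

def transform_pattern_py_alt (blacks : List (List Int)) (rotation : Int) (flip_h : Bool) (flip_v : Bool) : List (List Int) :=
  let grid := tpGridB blacks flip_h flip_v
  if rotation ≤ 0 then grid
  else
    let turns := PySem.Int.mod rotation 4
    if turns = 1 then
      (List.range 8).map (fun (r : Nat) => (List.range 8).map (fun (c : Nat) =>
        PySem.List.pyGetD (PySem.List.pyGetD grid (8 - 1 - (c : Int)) []) (r : Int) 0))
    else if turns = 2 then
      (List.range 8).map (fun (r : Nat) => (List.range 8).map (fun (c : Nat) =>
        PySem.List.pyGetD (PySem.List.pyGetD grid (8 - 1 - (r : Int)) []) (8 - 1 - (c : Int)) 0))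
    else if turns = 3 then
      (List.range 8).map (fun (r : Nat) => (List.range 8).map (fun (c : Nat) =>
        PySem.List.pyGetD (PySem.List.pyGetD grid (c : Int) []) (8 - 1 - (r : Int)) 0))
    else
      (List.range 8).map (fun (r : Nat) => (List.range 8).map (fun (c : Nat) =>
        PySem.List.pyGetD (PySem.List.pyGetD grid (r : Int) []) (c : Int) 0))

-- ===== PRECONDITION & SPEC =====
-- A raises IndexError iff rotation ≥ 1 and (after the flips) the grid lacks an 8×8
-- upper-left block, i.e. fewer than 8 rows or one of the 8 source rows shorter than 8.
def Pre_transform_pattern_py (blacks : List (List Int)) (rotation : Int) (flip_h : Bool) (flip_v : Bool) : Prop :=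
  rotation ≤ 0 ∨
    (8 ≤ blacks.length ∧
      ∀ i ∈ List.range 8, 8 ≤ (blacks.getD (if flip_v then blacks.length - 1 - i else i) []).length)
instance (blacks : List (List Int)) (rotation : Int) (flip_h : Bool) (flip_v : Bool) : Decidable (Pre_transform_pattern_py blacks rotation flip_h flip_v) := by unfold Pre_transform_pattern_py; infer_instance

def pvWitness_transform_pattern_py : List (List Int) × Int × Bool × Bool := ([[1, 0], [0, 1]], 0, true, false)

def Spec_transform_pattern_py (blacks : List (List Int)) (rotation : Int) (flip_h : Bool) (flip_v : Bool) (out : List (List Int)) : Prop := out = transform_pattern_py_alt blacks rotation flip_h flip_v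
instance (blacks : List (List Int)) (rotation : Int) (flip_h : Bool) (flip_v : Bool) (out : List (List Int)) : Decidable (Spec_transform_pattern_py blacks rotation flip_h flip_v out) := by unfold Spec_transform_pattern_py; infer_instance

-- ===== CLAIM (what is proved, stated in full; the proofs are below) =====
def Claim_equal_transform_pattern_py : Prop := ∀ (blacks : List (List Int)) (rotation : Int) (flip_h : Bool) (flip_v : Bool), Dom_transform_pattern_py blacks rotation flip_h flip_v → Pre_transform_pattern_py blacks rotation flip_h flip_v → Spec_transform_pattern_py blacks rotation flip_h flip_v (transform_pattern_py blacks rotation flip_h flip_v)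

-- ===== LEMMAS AND PROOFS =====

-- the two flip phases compute the same grid
lemma tpFlips_eq_gridB (blacks : List (List Int)) (fh fv : Bool) :
    tpFlips blacks fh fv = tpGridB blacks fh fv := by
  unfold tpFlips tpGridB
  cases fh <;> simp [PySem.List.slice_none_none]

-- an 8×8 grid given by an entry function
def tpGrid (h : Nat → Nat → Int) : List (List Int) := (List.range 8).map (fun r => (List.range 8).map (fun c => h r c))

-- one 90° rotation step, Nat-indexed
def tpRot (g : List (List Int)) : List (List Int) :=
  (List.range 8).map (fun r => (List.range 8).map (fun c => (g.getD (7 - c) []).getD r 0))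

lemma tpGrid_congr {h h' : Nat → Nat → Int} (H : ∀ r c, r < 8 → c < 8 → h r c = h' r c) : tpGrid h = tpGrid h' := by
  unfold tpGrid
  refine List.map_congr_left (fun r hr => ?_)
  refine List.map_congr_left (fun c hc => ?_)
  exact H r c (List.mem_range.mp hr) (List.mem_range.mp hc)

lemma getD_map_range8 (h : Nat → Int) (i : Nat) (hi : i < 8) :
    ((List.range 8).map h).getD i 0 = h i := by
  simp [List.getD_eq_getElem?_getD, hi]

lemma tpRot_grid (h : Nat → Nat → Int) : tpRot (tpGrid h) = tpGrid (fun r c => h (7 - c) r) := by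
  unfold tpRot tpGrid
  refine List.map_congr_left (fun r hr => ?_)
  refine List.map_congr_left (fun c hc => ?_)
  rw [List.mem_range] at hr hc
  have h1 : (7 - c) < 8 := by omega
  have : ((List.range 8).map (fun r => (List.range 8).map (fun c => h r c))).getD (7 - c) [] =
      (List.range 8).map (fun c' => h (7 - c) c') := by
    simp [List.getD_eq_getElem?_getD, h1]
  rw [this, getD_map_range8 _ r hr]

lemma tpRot_iter4 (h : Nat → Nat → Int) : tpRot^[4] (tpGrid h) = tpGrid h := by
  show tpRot (tpRot (tpRot (tpRot (tpGrid h)))) = tpGrid h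
  rw [tpRot_grid, tpRot_grid, tpRot_grid, tpRot_grid]
  refine tpGrid_congr (fun r c hr hc => ?_)
  rw [show 7 - (7 - r) = r from by omega, show 7 - (7 - c) = c from by omega]

lemma tpRot_iter_mod (k : Nat) (h : Nat → Nat → Int) : tpRot^[k] (tpGrid h) = tpRot^[k % 4] (tpGrid h) := by
  induction k using Nat.strong_induction_on with
  | _ k ih =>
    by_cases hk : k < 4
    · rw [Nat.mod_eq_of_lt hk]
    · have hk4 : k = (k - 4) + 4 := by omega
      rw [hk4, Function.iterate_add_apply, tpRot_iter4, ih (k - 4) (by omega)]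
      congr 1
      omega

lemma foldl_const_iterate {α β : Type} (l : List β) (f : α → α) (a : α) :
    l.foldl (fun x _ => f x) a = f^[l.length] a := by
  induction l generalizing a with
  | nil => rfl
  | cons b t ih => simp [List.foldl_cons, ih, Function.iterate_succ_apply]

-- the port's fold step is tpRot
lemma step_eq_tpRot (g : List (List Int)) :
    (PySem.List.pyRange 0 8 1).map (fun r =>
      (PySem.List.pyRange 0 8 1).map (fun c =>
        PySem.List.pyGetD (PySem.List.pyGetD g (8 - 1 - c) []) r 0)) = tpRot g := by
  have hrange : PySem.List.pyRange 0 8 1 = [0, 1, 2, 3, 4, 5, 6, 7] := by decide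
  unfold tpRot
  rw [hrange]
  norm_num [List.range_succ, PySem.List.pyGetD_ofNat', PySem.List.pyGetD_natCast]

-- ===== VERDICT (by name: the statement is the Claim_ definition above) =====
theorem transform_pattern_py_spec : Claim_equal_transform_pattern_py := by
  intro blacks rotation fh fv _hdom _hpre
  unfold Spec_transform_pattern_py transform_pattern_py transform_pattern_py_alt
  by_cases hrot : rotation ≤ 0
  · rw [if_pos hrot, PySem.List.pyRange_one_eq_nil hrot, List.foldl_nil, tpFlips_eq_gridB]
  · rw [if_neg hrot]
    have hstep : (fun (result : List (List Int)) (_ : Int) =>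
        (PySem.List.pyRange 0 8 1).map (fun r =>
          (PySem.List.pyRange 0 8 1).map (fun c =>
            PySem.List.pyGetD (PySem.List.pyGetD result (8 - 1 - c) []) r 0))) =
        (fun result _ => tpRot result) := by
      funext g x
      exact step_eq_tpRot g
    rw [hstep, foldl_const_iterate, PySem.List.length_pyRange_one]
    set F := tpFlips blacks fh fv with hF
    set k := (rotation - 0).toNat with hk
    have hk1 : 1 ≤ k := by omega
    have hmod : PySem.Int.mod rotation 4 = ((k % 4 : Nat) : Int) := by
      rw [PySem.Int.mod_eq_emod_of_pos (by norm_num)]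
      omega
    -- peel the first rotation: the grid is 8×8 from then on
    have hpeel : k = (k - 1) + 1 := by omega
    rw [hpeel, Function.iterate_succ_apply]
    have hfirst : tpRot F = tpGrid (fun r c => (F.getD (7 - c) []).getD r 0) := rfl
    rw [hfirst, tpRot_iter_mod, hmod, ← tpFlips_eq_gridB, ← hF]
    have hs : k % 4 = 0 ∨ k % 4 = 1 ∨ k % 4 = 2 ∨ k % 4 = 3 := by omega
    rcases hs with h4 | h4 | h4 | h4 <;> rw [h4]
    · rw [show (k - 1) % 4 = 3 from by omega]
      norm_num
      rw [tpRot_grid, tpRot_grid, tpRot_grid]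
      exact tpGrid_congr (fun r c hr hc => by
        rw [show 7 - (7 - r) = r from by omega, show 7 - (7 - c) = c from by omega])
    · rw [show (k - 1) % 4 = 0 from by omega]
      norm_num
      exact tpGrid_congr (fun r c hr hc => by
        rw [show (7:Int) - (c:Int) = ((7 - c : Nat) : Int) from by omega, PySem.List.pyGetD_natCast]
        simp [List.getD_eq_getElem?_getD])
    · rw [show (k - 1) % 4 = 1 from by omega]
      norm_num
      rw [tpRot_grid]
      exact tpGrid_congr (fun r c hr hc => by
        rw [show (7:Int) - (r:Int) = ((7 - r : Nat) : Int) from by omega,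
            show (7:Int) - (c:Int) = ((7 - c : Nat) : Int) from by omega,
            PySem.List.pyGetD_natCast]
        simp [List.getD_eq_getElem?_getD, PySem.List.pyGetD_natCast])
    · rw [show (k - 1) % 4 = 2 from by omega]
      norm_num
      rw [tpRot_grid, tpRot_grid]
      exact tpGrid_congr (fun r c hr hc => by
        rw [show 7 - (7 - c) = c from by omega,
            show (7:Int) - (r:Int) = ((7 - r : Nat) : Int) from by omega]
        simp [List.getD_eq_getElem?_getD, PySem.List.pyGetD_natCast])
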